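-- pv_equiv track=rewrite | github.com/JohnDRubio/CS6120_Lessons | lesson04/johns_workList.py | reachingDefsMerge
-- ===== SOURCE A (Python) =====
-- def reachingDefsMerge(predecessors, outs):
--    merged = {}   # {varName -> [list of values from all predecessor blocks]}
--    for predecessor in predecessors:
--        if predecessor not in merged and predecessor in outs:
--            merged[predecessor] = [outs[predecessor]]
--        else:
--            if predecessor in outs:
--             merged[predecessor].append(outs[predecessor])
--    return merged
-- ===== SOURCE B (Python) =====
-- def reachingDefsMerge(predecessors, outs):
--     counts = {}
--     for p in predecessors:
--         counts[p] = counts.get(p, 0) + 1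
--     return {p: [outs[p]] * c for p, c in counts.items() if p in outs}
-- ===== Notes on version B (the rewrite author's own statement) =====
-- stated objective: alternative
-- what changed: B first counts occurrences of each predecessor (first-occurrence order preserved) and then builds each dict entry in one shot as [outs[p]]*count, instead of A's incremental append-one-value-per-occurrence loop with a membership branch per step.
import Mathlib
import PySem

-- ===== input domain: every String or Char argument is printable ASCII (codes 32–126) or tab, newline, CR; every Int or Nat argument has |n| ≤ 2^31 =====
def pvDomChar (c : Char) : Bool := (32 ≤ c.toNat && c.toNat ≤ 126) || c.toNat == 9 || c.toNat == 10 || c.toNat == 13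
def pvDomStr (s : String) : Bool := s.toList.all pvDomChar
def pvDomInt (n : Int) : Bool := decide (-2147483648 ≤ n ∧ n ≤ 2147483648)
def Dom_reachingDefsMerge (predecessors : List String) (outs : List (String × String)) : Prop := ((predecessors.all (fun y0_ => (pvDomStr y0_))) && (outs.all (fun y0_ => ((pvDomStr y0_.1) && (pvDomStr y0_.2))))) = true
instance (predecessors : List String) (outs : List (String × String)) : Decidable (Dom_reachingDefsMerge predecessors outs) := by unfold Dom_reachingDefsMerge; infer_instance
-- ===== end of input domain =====

-- B builds each dict entry at once as replicate(count) instead of A's per-occurrence append loop (alternative decomposition, same cost).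


-- ===== PORT A =====
-- the loop body of A: 'if p not in merged and p in outs: merged[p] = [outs[p]] else: if p in outs: merged[p].append(outs[p])'
-- (merged[p].append(v) is Dict.modify; its [] default is never used, the key is always present in that branch)
def stepA (O : PySem.Dict String String) (merged : PySem.Dict String (List String)) (predecessor : String) : PySem.Dict String (List String) :=
  if !merged.contains predecessor && O.contains predecessor then
    merged.insert predecessor [O.getD predecessor ""]
  else
    if O.contains predecessor then
      merged.modify predecessor [] (fun l => l ++ [O.getD predecessor ""])
    else merged

def reachingDefsMerge (predecessors : List String) (outs : List (String × String)) : List (String × List String) :=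
  (predecessors.foldl (stepA (PySem.Dict.mk outs)) PySem.Dict.empty).items

-- ===== PORT B =====
def reachingDefsMerge_alt (predecessors : List String) (outs : List (String × String)) : List (String × List String) :=
  let counts := predecessors.foldl (fun d p => d.insert p (d.getD p (0:Int) + 1)) PySem.Dict.empty
  counts.items.filterMap (fun pc =>
    if (PySem.Dict.mk outs).contains pc.1 then
      some (pc.1, List.replicate pc.2.toNat ((PySem.Dict.mk outs).getD pc.1 ""))
    else none)

-- ===== PRECONDITION & SPEC =====
def Spec_reachingDefsMerge (predecessors : List String) (outs : List (String × String)) (out : List (String × List String)) : Prop := out = reachingDefsMerge_alt predecessors outs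
instance (predecessors : List String) (outs : List (String × String)) (out : List (String × List String)) : Decidable (Spec_reachingDefsMerge predecessors outs out) := by unfold Spec_reachingDefsMerge; infer_instance

-- ===== CLAIM (what is proved, stated in full; the proofs are below) =====
def Claim_equal_reachingDefsMerge : Prop := ∀ (predecessors : List String) (outs : List (String × String)), Dom_reachingDefsMerge predecessors outs → Spec_reachingDefsMerge predecessors outs (reachingDefsMerge predecessors outs)

-- ===== LEMMAS AND PROOFS =====

-- the entry A's loop has produced for each key after scanning l, as a function of l alone
def entryFor (O : PySem.Dict String String) (l : List String) (p : String) : Option (String × List String) :=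
  if O.contains p then some (p, List.replicate (l.count p) (O.getD p "")) else none

lemma map_fst_filterMap_entryFor (O : PySem.Dict String String) (l : List String) (s : List String) :
    ((s.filterMap (entryFor O l)).map Prod.fst) = s.filter (fun p => O.contains p) := by
  simp only [entryFor]
  induction s with
  | nil => rfl
  | cons a s ih =>
    by_cases h : O.contains a
    · simp [h, ih]
    · simp [h, ih]

lemma itemsA (O : PySem.Dict String String) (l : List String) :
    (l.foldl (stepA O) PySem.Dict.empty).items
      = (PySem.Set.ofList l).filterMap (entryFor O l) := by
  induction l using List.reverseRecOn with
  | nil => rfl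
  | append_singleton l x ih =>
    rw [List.foldl_append, List.foldl_cons, List.foldl_nil]
    have hkeys : (l.foldl (stepA O) PySem.Dict.empty).keys
        = (PySem.Set.ofList l).filter (fun p => O.contains p) := by
      simpa [PySem.Dict.keys, ih] using map_fst_filterMap_entryFor O l (PySem.Set.ofList l)
    have hnodup : (l.foldl (stepA O) PySem.Dict.empty).keys.Nodup := by
      rw [hkeys]; exact (PySem.Set.nodup_ofList l).filter _
    have hcontains : (l.foldl (stepA O) PySem.Dict.empty).contains x
        = (decide (x ∈ l) && O.contains x) := by
      rw [PySem.Dict.contains_eq_decide_mem_keys, hkeys]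
      by_cases hx : x ∈ l <;> by_cases ho : O.contains x = true <;>
        simp [List.mem_filter, PySem.Set.mem_ofList, hx, ho]
    by_cases hO : O.contains x
    case neg =>
      -- x not in outs: the step is a no-op and x contributes no entry
      have hstep : stepA O (l.foldl (stepA O) PySem.Dict.empty) x = l.foldl (stepA O) PySem.Dict.empty := by
        simp [stepA, hO]
      rw [hstep, ih]
      by_cases hx : x ∈ l
      · rw [PySem.Set.ofList_append_singleton, PySem.Set.add_of_mem ((PySem.Set.mem_ofList (xs := l) _).2 hx)]
        apply List.filterMap_congr
        intro p hp
        by_cases hpx : p = x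
        · subst hpx; simp [entryFor, hO]
        · simp [entryFor, List.count_append, 
            (by simpa [eq_comm] using hpx : ¬ x = p)]
      · rw [PySem.Set.ofList_append_singleton, PySem.Set.add_of_not_mem (fun h => hx ((PySem.Set.mem_ofList (xs := l) _).1 h)), List.filterMap_append]
        have h2 : List.filterMap (entryFor O (l ++ [x])) [x] = [] := by
          simp [entryFor, hO]
        rw [h2, List.append_nil]
        apply List.filterMap_congr
        intro p hp
        have hpl : p ∈ l := (PySem.Set.mem_ofList (xs := l) _).1 hp
        have hpx : ¬ x = p := fun h => hx (h ▸ hpl)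
        simp [entryFor, List.count_append,  hpx]
    case pos =>
      by_cases hx : x ∈ l
      · -- x already has an entry: append one more copy
        have hc : (l.foldl (stepA O) PySem.Dict.empty).contains x = true := by
          simp [hcontains, hx, hO]
        have hmem : (x, List.replicate (l.count x) (O.getD x "")) ∈ (l.foldl (stepA O) PySem.Dict.empty).items := by
          rw [ih]
          have hxs : x ∈ PySem.Set.ofList l := (PySem.Set.mem_ofList (xs := l) _).2 hx
          exact List.mem_filterMap.2 ⟨x, hxs, by simp [entryFor, hO]⟩
        have hgetD : (l.foldl (stepA O) PySem.Dict.empty).getD x []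
            = List.replicate (l.count x) (O.getD x "") :=
          PySem.Dict.getD_of_mem_items _ hmem hnodup _
        have hstep : stepA O (l.foldl (stepA O) PySem.Dict.empty) x
            = (l.foldl (stepA O) PySem.Dict.empty).insert x
                (List.replicate (l.count x) (O.getD x "") ++ [O.getD x ""]) := by
          simp [stepA, PySem.Dict.modify, hc, hO, hgetD]
        rw [hstep, PySem.Dict.items_insert_of_contains _ _ hc, ih,
            PySem.Set.ofList_append_singleton, PySem.Set.add_of_mem ((PySem.Set.mem_ofList (xs := l) _).2 hx),
            List.map_filterMap]
        apply List.filterMap_congr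
        intro p hp
        by_cases hpx : p = x
        · subst hpx
          simp [entryFor, hO, List.count_append, 
            ← List.replicate_succ' ]
        · simp [entryFor, List.count_append,
            (by simpa [eq_comm] using hpx : ¬ x = p), hpx]
      · -- fresh key in outs: a new entry [v] is appended
        have hc : (l.foldl (stepA O) PySem.Dict.empty).contains x = false := by
          simp [hcontains, hx]
        have hstep : stepA O (l.foldl (stepA O) PySem.Dict.empty) x
            = (l.foldl (stepA O) PySem.Dict.empty).insert x [O.getD x ""] := by
          simp [stepA, hc, hO]
        rw [hstep, PySem.Dict.items_insert_of_not_contains _ _ hc, ih,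
            PySem.Set.ofList_append_singleton, PySem.Set.add_of_not_mem (fun h => hx ((PySem.Set.mem_ofList (xs := l) _).1 h)),
            List.filterMap_append]
        have h2 : List.filterMap (entryFor O (l ++ [x])) [x] = [(x, [O.getD x ""])] := by
          have hc0 : l.count x = 0 := List.count_eq_zero.2 hx
          simp [entryFor, hO, List.count_append, hc0]
        rw [h2]
        congr 1
        apply List.filterMap_congr
        intro p hp
        have hpl : p ∈ l := (PySem.Set.mem_ofList (xs := l) _).1 hp
        have hpx : ¬ x = p := fun h => hx (h ▸ hpl)
        simp [entryFor, List.count_append,  hpx]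

lemma itemsB (O : PySem.Dict String String) (preds : List String) :
    (preds.foldl (fun d p => d.insert p (d.getD p (0:Int) + 1)) PySem.Dict.empty).items.filterMap
      (fun pc => if O.contains pc.1 then
          some (pc.1, List.replicate pc.2.toNat (O.getD pc.1 "")) else none)
      = (PySem.Set.ofList preds).filterMap (entryFor O preds) := by
  rw [PySem.Dict.foldl_insert_getD_add_one_eq_counter, PySem.Dict.items_counter,
      List.filterMap_map]
  apply List.filterMap_congr
  intro p hp
  simp [entryFor, Function.comp]

-- ===== VERDICT (by name: the statement is the Claim_ definition above) =====
theorem reachingDefsMerge_spec : Claim_equal_reachingDefsMerge := by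
  intro predecessors outs _
  unfold Spec_reachingDefsMerge reachingDefsMerge reachingDefsMerge_alt
  rw [itemsA, itemsB]
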